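-- pv_equiv track=rewrite | github.com/RenukaCode/DSA | 06_Arrays/number_appears_once.py | numberOnce
-- ===== SOURCE A (Python) =====
-- def numberOnce(arr):
--     freq = {}
--     for i in arr:
--         if i in freq:
--             freq[i] += 1
--         else:
--             freq[i] = 1
--     for key, value in freq.items():
--         if value == 1:
--             return key
-- ===== SOURCE B (Python) =====
-- def numberOnce(arr):
--     for x in arr:
--         if arr.count(x) == 1:
--             return x
-- ===== Notes on version B (the rewrite author's own statement) =====
-- stated objective: simpler
-- what changed: B drops the frequency dictionary entirely: it scans arr in order and returns the first element x with arr.count(x) == 1, relying on repeated counting instead of a prebuilt frequency map.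
import Mathlib
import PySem

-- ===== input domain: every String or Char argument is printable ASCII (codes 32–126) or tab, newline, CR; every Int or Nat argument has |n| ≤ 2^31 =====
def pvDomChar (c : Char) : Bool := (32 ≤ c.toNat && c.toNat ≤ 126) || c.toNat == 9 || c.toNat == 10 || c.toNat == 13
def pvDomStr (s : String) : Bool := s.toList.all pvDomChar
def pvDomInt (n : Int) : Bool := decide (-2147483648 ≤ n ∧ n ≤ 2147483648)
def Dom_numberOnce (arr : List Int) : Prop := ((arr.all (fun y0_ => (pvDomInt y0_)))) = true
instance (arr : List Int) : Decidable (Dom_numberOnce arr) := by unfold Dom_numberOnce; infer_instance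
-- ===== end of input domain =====

-- B is a simpler dictionary-free rewrite: it returns the first element whose total count in arr is 1.

-- ===== PORT A =====
-- the second Python loop: 'for key, value in freq.items(): if value == 1: return key'
def numberOnceLoop : List (Int × Int) → Option Int
  | [] => none
  | (k, v) :: rest => if v = 1 then some k else numberOnceLoop rest

def numberOnce (arr : List Int) : Option Int :=
  let freq : PySem.Dict Int Int :=
    arr.foldl (fun d i => if d.contains i then d.modify i 0 (· + 1) else d.insert i 1)
      PySem.Dict.empty
  numberOnceLoop freq.items

-- ===== PORT B =====
-- 'for x in arr: if arr.count(x) == 1: return x'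
def numberOnceAltGo (arr : List Int) : List Int → Option Int
  | [] => none
  | x :: rest => if PySem.List.count arr x = 1 then some x else numberOnceAltGo arr rest

def numberOnce_alt (arr : List Int) : Option Int := numberOnceAltGo arr arr

-- ===== PRECONDITION & SPEC =====
def Spec_numberOnce (arr : List Int) (out : Option Int) : Prop := out = numberOnce_alt arr
instance (arr : List Int) (out : Option Int) : Decidable (Spec_numberOnce arr out) := by unfold Spec_numberOnce; infer_instance

-- ===== CLAIM (what is proved, stated in full; the proofs are below) =====
def Claim_equal_numberOnce : Prop := ∀ (arr : List Int), Dom_numberOnce arr → Spec_numberOnce arr (numberOnce arr)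

-- ===== LEMMAS AND PROOFS =====

-- A's update step is exactly Counter's step
theorem pv_step_eq (d : PySem.Dict Int Int) (i : Int) :
    (if d.contains i then d.modify i 0 (· + 1) else d.insert i 1) = d.modify i 0 (· + 1) := by
  by_cases h : d.contains i = true
  · simp [h]
  · have hg : d.getD i 0 = 0 := PySem.Dict.getD_of_not_contains d 0 (by simpa using h)
    simp [h, PySem.Dict.modify, hg]

theorem pv_freq_eq_counter (arr : List Int) :
    arr.foldl (fun d i => if d.contains i then d.modify i 0 (· + 1) else d.insert i 1)
      PySem.Dict.empty = PySem.Dict.counter arr := by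
  rw [PySem.Dict.counter_eq_foldl]
  congr 1
  funext d i
  exact pv_step_eq d i

theorem pv_loop_eq_find (l : List (Int × Int)) :
    numberOnceLoop l = (l.find? (fun p => p.2 == 1)).map Prod.fst := by
  induction l with
  | nil => rfl
  | cons p rest ih =>
    obtain ⟨k, v⟩ := p
    cases h : (v == 1) <;> simp_all [numberOnceLoop]

theorem pv_altGo_eq_find (arr l : List Int) :
    numberOnceAltGo arr l = l.find? (fun x => PySem.List.count arr x == 1) := by
  induction l with
  | nil => rfl
  | cons x rest ih =>
    cases h : (PySem.List.count arr x == 1) <;> simp_all [numberOnceAltGo]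

theorem pv_find?_discard (P : Int → Bool) (x : Int) (h : P x = false) (s : List Int) :
    (PySem.Set.discard s x).find? P = s.find? P := by
  unfold PySem.Set.discard
  induction s with
  | nil => rfl
  | cons y rest ih =>
    by_cases hyx : y = x
    · subst hyx
      simp [h, ih]
    · cases hp : P y <;>
        simp [hyx, hp, ih]

theorem pv_find?_ofList (P : Int → Bool) (xs : List Int) :
    (PySem.Set.ofList xs).find? P = xs.find? P := by
  induction xs with
  | nil => rfl
  | cons x rest ih =>
    rw [PySem.Set.ofList_cons]
    cases hp : P x
    · simp [hp, pv_find?_discard P x hp, ih]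
    · simp [hp]

-- ===== VERDICT (by name: the statement is the Claim_ definition above) =====
theorem numberOnce_spec : Claim_equal_numberOnce := by
  intro arr _
  show numberOnce arr = numberOnce_alt arr
  show numberOnceLoop
      ((arr.foldl (fun d i => if d.contains i then d.modify i 0 (· + 1) else d.insert i 1)
        PySem.Dict.empty).items) = numberOnce_alt arr
  unfold numberOnce_alt
  rw [pv_freq_eq_counter, PySem.Dict.items_counter, pv_loop_eq_find, pv_altGo_eq_find,
    List.find?_map, pv_find?_ofList]
  have hpred : ((fun p : Int × Int => p.2 == 1) ∘ fun k => (k, (List.count k arr : Int)))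
      = fun x => PySem.List.count arr x == 1 := by
    funext x
    simp [PySem.List.count, Function.comp]
  rw [hpred]
  cases List.find? (fun x => PySem.List.count arr x == 1) arr <;> simp
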